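-- pv_equiv track=rewrite | github.com/YasminSouzaL/SIN492_Topicos2 | heuristica.py | calcular_custo_total
-- ===== SOURCE A (Python) =====
-- def calcular_custo_total(solucao, custo_linear, fluxo, distancia):
--     """
--     Calcula o custo total de uma solução já construída.
--
--     Função objetivo do GQAP (simplificada):
--         F(s) = SUM_i  custo_linear[i][s[i]]
--              + SUM_{i<k}  fluxo[i][k] * distancia[s[i]][s[k]]
--
--     Complexidade: O(n^2)
--     """
--     n = len(solucao)
--     custo = 0
--
--     # Termo linear
--     for i in range(n):
--         if solucao[i] != -1:
--             custo += custo_linear[i][solucao[i]]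
--
--     # Termo quadrático (interações entre pares de entidades alocadas)
--     for i in range(n):
--         for k in range(i + 1, n):
--             if solucao[i] != -1 and solucao[k] != -1:
--                 custo += fluxo[i][k] * distancia[solucao[i]][solucao[k]]
--
--     return custo
-- ===== SOURCE B (Python) =====
-- def calcular_custo_total(solucao, custo_linear, fluxo, distancia):
--     # Bucket the assigned entity indices by location, then factor each distance
--     # out of its bucket pair: F(s) = sum_i c[i][s_i] + sum_{p,q} d[p][q] * sum flows.
--     grupos = {}
--     for i, p in enumerate(solucao):
--         if p != -1:
--             grupos.setdefault(p, []).append(i)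
--     total = sum(custo_linear[i][p] for p, idx in grupos.items() for i in idx)
--     for p, idx_p in grupos.items():
--         for q, idx_q in grupos.items():
--             s = sum(fluxo[i][k] for i in idx_p for k in idx_q if i < k)
--             if s:
--                 total += s * distancia[p][q]
--     return total
-- ===== Notes on version B (the rewrite author's own statement) =====
-- stated objective: alternative
-- what changed: B groups the assigned entity indices into a dict keyed by location and computes the quadratic term per pair of location buckets, summing the flows of each bucket pair first and multiplying by the distance once, instead of A's nested index loops that look up a distance for every index pair.
import Mathlib
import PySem

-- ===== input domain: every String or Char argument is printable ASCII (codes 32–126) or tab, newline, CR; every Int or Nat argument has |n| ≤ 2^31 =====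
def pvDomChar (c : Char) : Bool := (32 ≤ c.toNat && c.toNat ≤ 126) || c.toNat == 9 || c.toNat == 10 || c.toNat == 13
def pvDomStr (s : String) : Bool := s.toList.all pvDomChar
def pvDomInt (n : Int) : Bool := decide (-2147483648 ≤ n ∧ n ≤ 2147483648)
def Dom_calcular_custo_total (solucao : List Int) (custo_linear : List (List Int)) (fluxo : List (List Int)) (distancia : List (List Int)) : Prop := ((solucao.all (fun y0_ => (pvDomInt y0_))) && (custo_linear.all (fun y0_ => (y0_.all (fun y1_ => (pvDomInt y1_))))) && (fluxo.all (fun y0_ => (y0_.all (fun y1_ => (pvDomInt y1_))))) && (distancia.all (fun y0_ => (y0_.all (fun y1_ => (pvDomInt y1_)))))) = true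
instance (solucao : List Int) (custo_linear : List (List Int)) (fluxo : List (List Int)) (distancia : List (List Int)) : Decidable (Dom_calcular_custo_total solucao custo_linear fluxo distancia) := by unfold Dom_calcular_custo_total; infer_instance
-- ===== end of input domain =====

-- B buckets the assigned entity indices by location in a dict and computes the
-- quadratic term per pair of location buckets (flows summed first, distance
-- multiplied once per bucket pair); objective: alternative algorithm, same O(n^2).

-- ===== PORT A =====
def calcular_custo_total (solucao : List Int) (custo_linear : List (List Int)) (fluxo : List (List Int)) (distancia : List (List Int)) : Int :=
  let n : Int := solucao.length
  -- termo linear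
  let custo : Int := (PySem.List.pyRange 0 n 1).foldl (fun custo i =>
      if PySem.List.pyGetD solucao i 0 ≠ -1 then
        custo + PySem.List.pyGetD (PySem.List.pyGetD custo_linear i []) (PySem.List.pyGetD solucao i 0) 0
      else custo) 0
  -- termo quadrático
  (PySem.List.pyRange 0 n 1).foldl (fun custo i =>
    (PySem.List.pyRange (i + 1) n 1).foldl (fun custo k =>
      if PySem.List.pyGetD solucao i 0 ≠ -1 ∧ PySem.List.pyGetD solucao k 0 ≠ -1 then
        custo + PySem.List.pyGetD (PySem.List.pyGetD fluxo i []) k 0 *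
                PySem.List.pyGetD (PySem.List.pyGetD distancia (PySem.List.pyGetD solucao i 0) []) (PySem.List.pyGetD solucao k 0) 0
      else custo) custo) custo

-- ===== PORT B =====
def calcular_custo_total_alt (solucao : List Int) (custo_linear : List (List Int)) (fluxo : List (List Int)) (distancia : List (List Int)) : Int :=
  -- grupos: location -> list of assigned entity indices (setdefault(p, []).append(i))
  let grupos : PySem.Dict Int (List Int) :=
    (PySem.List.enumerate solucao).foldl (fun d ip =>
      if ip.2 ≠ -1 then d.modify ip.2 [] (fun L => L ++ [ip.1]) else d) PySem.Dict.empty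
  -- termo linear, summed bucket by bucket
  let total : Int :=
    (grupos.items.flatMap (fun pL => pL.2.map (fun i =>
      PySem.List.pyGetD (PySem.List.pyGetD custo_linear i []) pL.1 0))).sum
  -- termo quadrático: one distance lookup per pair of buckets
  grupos.items.foldl (fun t pL =>
    grupos.items.foldl (fun t qM =>
      let s : Int := (pL.2.flatMap (fun i => (qM.2.filter (fun k => decide (i < k))).map
          (fun k => PySem.List.pyGetD (PySem.List.pyGetD fluxo i []) k 0))).sum
      if s ≠ 0 then t + s * PySem.List.pyGetD (PySem.List.pyGetD distancia pL.1 []) qM.1 0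
      else t) t) total

-- ===== PRECONDITION & SPEC =====
-- Pre_ excludes exactly the inputs where Python A raises IndexError: some needed
-- custo_linear / fluxo / distancia entry is out of range (Python negative-index
-- wraparound included via Raise.InRange).
def Pre_calcular_custo_total (solucao : List Int) (custo_linear : List (List Int)) (fluxo : List (List Int)) (distancia : List (List Int)) : Prop :=
  ∀ i ∈ List.range solucao.length, solucao.getD i 0 ≠ -1 →
    (PySem.Raise.InRange custo_linear.length i ∧
     PySem.Raise.InRange (custo_linear.getD i []).length (solucao.getD i 0)) ∧
    ∀ k ∈ List.range solucao.length, i < k → solucao.getD k 0 ≠ -1 →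
      PySem.Raise.InRange fluxo.length i ∧
      PySem.Raise.InRange (fluxo.getD i []).length k ∧
      PySem.Raise.InRange distancia.length (solucao.getD i 0) ∧
      PySem.Raise.InRange (PySem.List.pyGetD distancia (solucao.getD i 0) []).length (solucao.getD k 0)
instance (solucao : List Int) (custo_linear : List (List Int)) (fluxo : List (List Int)) (distancia : List (List Int)) : Decidable (Pre_calcular_custo_total solucao custo_linear fluxo distancia) := by unfold Pre_calcular_custo_total; infer_instance

def pvWitness_calcular_custo_total : List Int × List (List Int) × List (List Int) × List (List Int) :=
  ([0, 1, -1], [[1, 2], [3, 4], [5, 6]], [[0, 5, 0], [0, 0, 0], [0, 0, 0]], [[0, 7], [8, 0]])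

def Spec_calcular_custo_total (solucao : List Int) (custo_linear : List (List Int)) (fluxo : List (List Int)) (distancia : List (List Int)) (out : Int) : Prop := out = calcular_custo_total_alt solucao custo_linear fluxo distancia
instance (solucao : List Int) (custo_linear : List (List Int)) (fluxo : List (List Int)) (distancia : List (List Int)) (out : Int) : Decidable (Spec_calcular_custo_total solucao custo_linear fluxo distancia out) := by unfold Spec_calcular_custo_total; infer_instance

-- ===== CLAIM (what is proved, stated in full; the proofs are below) =====
def Claim_equal_calcular_custo_total : Prop := ∀ (solucao : List Int) (custo_linear : List (List Int)) (fluxo : List (List Int)) (distancia : List (List Int)), Dom_calcular_custo_total solucao custo_linear fluxo distancia → Pre_calcular_custo_total solucao custo_linear fluxo distancia → Spec_calcular_custo_total solucao custo_linear fluxo distancia (calcular_custo_total solucao custo_linear fluxo distancia)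

-- ===== LEMMAS AND PROOFS =====

-- shorthands for the cost-table lookups both programs perform
def pvCL (cl : List (List Int)) (x : Int × Int) : Int :=
  PySem.List.pyGetD (PySem.List.pyGetD cl x.1 []) x.2 0
def pvF (fl : List (List Int)) (i k : Int) : Int :=
  PySem.List.pyGetD (PySem.List.pyGetD fl i []) k 0
def pvD (di : List (List Int)) (p q : Int) : Int :=
  PySem.List.pyGetD (PySem.List.pyGetD di p []) q 0
def pvH (fl di : List (List Int)) (x y : Int × Int) : Int := pvF fl x.1 y.1 * pvD di x.2 y.2

-- the active assignments (index, location), in index order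
def pvAct (s : List Int) : List (Int × Int) :=
  (PySem.List.enumerate s).filter (fun ip => decide (ip.2 ≠ -1))
-- B's dict of buckets, as a fold over the active assignments
def pvGrp (s : List Int) : PySem.Dict Int (List Int) :=
  (pvAct s).foldl (fun d ip => d.modify ip.2 [] (fun L => L ++ [ip.1])) PySem.Dict.empty
-- the bucketed assignments flattened back to (index, location) pairs
def pvFlat (s : List Int) : List (Int × Int) :=
  (pvGrp s).items.flatMap (fun pL => pL.2.map (fun i => (i, pL.1)))

-- the common normal form of the quadratic term: over a pair list l,
-- sum over x of sums over later-indexed y of flow*distance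
def pvSum (fl di : List (List Int)) (l : List (Int × Int)) : Int :=
  (l.map (fun x => ((l.filter (fun y => decide (x.1 < y.1))).map (fun y => pvH fl di x y)).sum)).sum

-- finite sums over two lists commute
theorem pv_sum_swap {α β : Type} (l : List α) (m : List β) (f : α → β → Int) :
    (l.map (fun a => (m.map (f a)).sum)).sum = (m.map (fun b => (l.map (fun a => f a b)).sum)).sum := by
  induction l with
  | nil => simp
  | cons a ta ih =>
    simp only [List.map_cons, List.sum_cons]
    rw [PySem.List.sum_map_add_int, ih]

-- filtering range(0, n) by i < · is range(i+1, n)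
theorem pv_range_filter_lt (m : Nat) (b i : Int) : ∀ (a : Int), (b - a).toNat ≤ m →
    (PySem.List.pyRange a b).filter (fun k => decide (i < k)) = PySem.List.pyRange (max a (i + 1)) b := by
  induction m generalizing b i with
  | zero =>
    intro a ha
    rw [PySem.List.pyRange_one_eq_nil (by omega : b ≤ a),
        PySem.List.pyRange_one_eq_nil (by omega : b ≤ max a (i + 1))]
    rfl
  | succ m ih =>
    intro a ha
    by_cases hab : b ≤ a
    · rw [PySem.List.pyRange_one_eq_nil hab,
          PySem.List.pyRange_one_eq_nil (by omega : b ≤ max a (i + 1))]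
      rfl
    · have hlt : a < b := by omega
      rw [PySem.List.pyRange_one_cons hlt, List.filter_cons]
      by_cases hia : i < a
      · rw [if_pos (by simpa using hia)]
        rw [ih b i (a + 1) (by omega)]
        have h1 : max a (i + 1) = a := by omega
        have h2 : max (a + 1) (i + 1) = a + 1 := by omega
        rw [h1, h2, PySem.List.pyRange_one_cons hlt]
      · rw [if_neg (by simpa using hia)]
        rw [ih b i (a + 1) (by omega)]
        have h1 : max a (i + 1) = i + 1 := by omega
        have h2 : max (a + 1) (i + 1) = i + 1 := by omega
        rw [h1, h2]

-- pvAct as a map over the filtered index range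
theorem pv_act_eq (s : List Int) :
    pvAct s = ((PySem.List.pyRange 0 ((s.length : Int)) 1).filter
        (fun j => decide (PySem.List.pyGetD s j 0 ≠ -1))).map
      (fun j => (j, PySem.List.pyGetD s j 0)) := by
  unfold pvAct
  rw [PySem.List.enumerate_eq_map_pyRange s 0, List.filter_map, PySem.List.len_eq]
  rfl

-- A's value in normal form
theorem pv_A_eq (s : List Int) (cl fl di : List (List Int)) :
    calcular_custo_total s cl fl di = ((pvAct s).map (pvCL cl)).sum + pvSum fl di (pvAct s) := by
  unfold calcular_custo_total
  dsimp only
  rw [PySem.List.foldl_ite_eq_foldl_filter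
        (p := fun i => PySem.List.pyGetD s i 0 ≠ -1)
        (f := fun c i => c + PySem.List.pyGetD (PySem.List.pyGetD cl i [])
          (PySem.List.pyGetD s i 0) 0),
      PySem.List.foldl_add]
  have hinner : ∀ (c : Int), ∀ i ∈ PySem.List.pyRange 0 ((s.length : Int)) 1,
      (PySem.List.pyRange (i + 1) ((s.length : Int)) 1).foldl (fun c k =>
        if PySem.List.pyGetD s i 0 ≠ -1 ∧ PySem.List.pyGetD s k 0 ≠ -1 then
          c + PySem.List.pyGetD (PySem.List.pyGetD fl i []) k 0 *
              PySem.List.pyGetD (PySem.List.pyGetD di (PySem.List.pyGetD s i 0) [])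
                (PySem.List.pyGetD s k 0) 0
        else c) c
      = if PySem.List.pyGetD s i 0 ≠ -1 then
          c + ((((PySem.List.pyRange 0 ((s.length : Int)) 1).filter
                (fun j => decide (PySem.List.pyGetD s j 0 ≠ -1))).filter
                (fun k => decide (i < k))).map (fun k =>
            PySem.List.pyGetD (PySem.List.pyGetD fl i []) k 0 *
            PySem.List.pyGetD (PySem.List.pyGetD di (PySem.List.pyGetD s i 0) [])
              (PySem.List.pyGetD s k 0) 0)).sum
        else c := by
    intro c i hi
    have hi0 : 0 ≤ i := (PySem.List.mem_pyRange_one.mp hi).1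
    by_cases h : PySem.List.pyGetD s i 0 ≠ -1
    · rw [if_pos h,
        PySem.List.foldl_ite_eq_foldl_filter
          (p := fun k => PySem.List.pyGetD s i 0 ≠ -1 ∧ PySem.List.pyGetD s k 0 ≠ -1)
          (f := fun c k => c + PySem.List.pyGetD (PySem.List.pyGetD fl i []) k 0 *
            PySem.List.pyGetD (PySem.List.pyGetD di (PySem.List.pyGetD s i 0) [])
              (PySem.List.pyGetD s k 0) 0),
        List.filter_congr (fun k _ => by simp [h] :
          ∀ k ∈ PySem.List.pyRange (i + 1) ((s.length : Int)) 1,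
            (decide (PySem.List.pyGetD s i 0 ≠ -1 ∧ PySem.List.pyGetD s k 0 ≠ -1))
            = (decide (PySem.List.pyGetD s k 0 ≠ -1))),
        PySem.List.foldl_add,
        List.filter_comm,
        pv_range_filter_lt (((s.length : Int)) - 0).toNat ((s.length : Int)) i 0 (by omega),
        show max 0 (i + 1) = i + 1 from by omega]
    · rw [if_neg h,
        PySem.List.foldl_ite_eq_foldl_filter
          (p := fun k => PySem.List.pyGetD s i 0 ≠ -1 ∧ PySem.List.pyGetD s k 0 ≠ -1)
          (f := fun c k => c + PySem.List.pyGetD (PySem.List.pyGetD fl i []) k 0 *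
            PySem.List.pyGetD (PySem.List.pyGetD di (PySem.List.pyGetD s i 0) [])
              (PySem.List.pyGetD s k 0) 0),
        List.filter_eq_nil_iff.mpr (fun k _ => by simp [not_not.mp h]),
        List.foldl_nil]
  rw [PySem.List.foldl_congr_mem _ _ _ _ hinner,
      PySem.List.foldl_ite_eq_foldl_filter
        (p := fun i => PySem.List.pyGetD s i 0 ≠ -1),
      PySem.List.foldl_add,
      pv_act_eq s]
  unfold pvSum
  simp only [List.map_map, List.filter_map, Function.comp_def, pvCL, pvH, pvF, pvD, zero_add]

-- B's bucket at key c holds the active indices assigned to c, in order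
theorem pv_getD (s : List Int) (c : Int) :
    (pvGrp s).getD c [] = ((pvAct s).filter (fun ip => ip.2 == c)).map (fun ip => ip.1) := by
  have e1 : pvGrp s
      = ((pvAct s).map Prod.swap).foldl
          (fun d p => d.modify p.1 [] (fun L => L ++ [p.2])) PySem.Dict.empty :=
    (List.foldl_map (f := Prod.swap)
      (g := fun (d : PySem.Dict Int (List Int)) (p : Int × Int) =>
        d.modify p.1 ([] : List Int) (fun L => L ++ [p.2]))
      (l := pvAct s) (init := PySem.Dict.empty)).symm
  rw [e1, PySem.Dict.getD_foldl_modify_append, PySem.Dict.getD_empty, List.filter_map,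
      List.map_map]
  simp only [List.nil_append]
  rfl

theorem pv_nodup_keys (s : List Int) : (pvGrp s).keys.Nodup := by
  exact PySem.Dict.nodup_keys_foldl_modify_key (pvAct s) (fun ip => ip.2) []
    (fun _ ip L => L ++ [ip.1]) PySem.Dict.empty PySem.Dict.nodup_keys_empty

theorem pv_keys (s : List Int) : (pvGrp s).keys = PySem.Set.ofList ((pvAct s).map (fun ip => ip.2)) := by
  unfold pvGrp
  rw [PySem.Dict.keys_foldl_modify_key (pvAct s) (fun ip => ip.2) []
      (fun _ ip L => L ++ [ip.1]) PySem.Dict.empty,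
      PySem.Dict.keys_empty, PySem.Set.ofList_eq_foldl]
  rfl

-- a nodup key list covering all tags splits a pair list into its filter buckets
theorem pv_partition_perm (K : List Int) : ∀ (l : List (Int × Int)), K.Nodup →
    (∀ x ∈ l, x.2 ∈ K) → (K.flatMap (fun p => l.filter (fun ip => ip.2 == p))).Perm l := by
  induction K with
  | nil =>
    intro l _ hmem
    have : l = [] := by
      cases l with
      | nil => rfl
      | cons a ta => exact absurd (hmem a (by simp)) (by simp)
    simp [this]
  | cons p K' ih =>
    intro l hnd hmem
    rw [List.flatMap_cons]
    have hp : p ∉ K' := (List.nodup_cons.mp hnd).1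
    have hcong : K'.flatMap (fun q => l.filter (fun ip => ip.2 == q))
        = K'.flatMap (fun q => (l.filter (fun ip => !(ip.2 == p))).filter (fun ip => ip.2 == q)) := by
      rw [List.flatMap_def, List.flatMap_def]
      congr 1
      apply List.map_congr_left
      intro q hq
      have hqp : q ≠ p := fun h => hp (h ▸ hq)
      rw [List.filter_filter]
      apply List.filter_congr
      intro x _
      by_cases hxq : x.2 = q
      · have hxp : x.2 ≠ p := by rw [hxq]; exact hqp
        simp [hxq, hqp]
      · rw [show (x.2 == q) = false from by simpa using hxq]
        simp
    rw [hcong]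
    have hsub : ∀ x ∈ l.filter (fun ip => !(ip.2 == p)), x.2 ∈ K' := by
      intro x hx
      rcases List.mem_filter.mp hx with ⟨hxl, hxp⟩
      have := hmem x hxl
      simp only [List.mem_cons] at this
      rcases this with h | h
      · exfalso
        rw [h] at hxp
        simp at hxp
      · exact h
    have hperm := ih (l.filter (fun ip => !(ip.2 == p))) (List.nodup_cons.mp hnd).2 hsub
    exact List.Perm.trans (hperm.append_left _) (List.filter_append_perm _ l)

-- the flattened buckets are a permutation of the active assignments
theorem pv_flat_perm (s : List Int) : (pvFlat s).Perm (pvAct s) := by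
  have e : pvFlat s
      = (pvGrp s).keys.flatMap (fun p => (pvAct s).filter (fun ip => ip.2 == p)) := by
    unfold pvFlat
    rw [PySem.Dict.items_eq_map_keys _ (pv_nodup_keys s) ([] : List Int),
        List.flatMap_map, List.flatMap_def, List.flatMap_def]
    congr 1
    apply List.map_congr_left
    intro p _
    rw [pv_getD s p, List.map_map]
    calc ((pvAct s).filter (fun ip => ip.2 == p)).map ((fun i => (i, p)) ∘ (fun ip => ip.1))
        = ((pvAct s).filter (fun ip => ip.2 == p)).map id := by
          apply List.map_congr_left
          intro x hx
          have h2 : x.2 = p := by simpa using (List.mem_filter.mp hx).2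
          simp [Function.comp, ← h2]
      _ = (pvAct s).filter (fun ip => ip.2 == p) := List.map_id _
  rw [e, pv_keys s]
  apply pv_partition_perm
  · exact PySem.Set.nodup_ofList _
  · intro x hx
    rw [PySem.Set.mem_ofList]
    exact List.mem_map.mpr ⟨x, hx, rfl⟩

-- pvSum is invariant under permutation of the pair list
theorem pv_sum_perm (fl di : List (List Int)) {l l' : List (Int × Int)} (h : l.Perm l') :
    pvSum fl di l = pvSum fl di l' := by
  unfold pvSum
  rw [show (fun x => ((l.filter (fun y => decide (x.1 < y.1))).map (fun y => pvH fl di x y)).sum)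
        = (fun x => ((l'.filter (fun y => decide (x.1 < y.1))).map (fun y => pvH fl di x y)).sum) from
      funext (fun x => ((h.filter _).map _).sum_eq)]
  exact (h.map _).sum_eq

-- distribute the bucket-pair distance over the flow sum
theorem pv_step1 (fl di : List (List Int)) (pL qM : Int × List Int) :
    (pL.2.flatMap (fun i => (qM.2.filter (fun k => decide (i < k))).map
        (fun k => pvF fl i k))).sum * pvD di pL.1 qM.1
    = (pL.2.map (fun i => ((qM.2.filter (fun k => decide (i < k))).map
        (fun k => pvF fl i k * pvD di pL.1 qM.1)).sum)).sum := by
  rw [List.flatMap_def, List.sum_flatten, List.map_map, ← List.sum_map_mul_right]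
  apply congrArg List.sum
  apply List.map_congr_left
  intro i _
  simp only [Function.comp_def]
  rw [← List.sum_map_mul_right]

-- for a fixed left assignment, summing a bucket-pair term over all buckets is
-- summing over the flattened pair list filtered to later indices
theorem pv_step3 (s : List Int) (fl di : List (List Int)) (i p : Int) :
    ((pvGrp s).items.map (fun qM => ((qM.2.filter (fun k => decide (i < k))).map
        (fun k => pvF fl i k * pvD di p qM.1)).sum)).sum
    = (((pvFlat s).filter (fun y => decide (i < y.1))).map
        (fun y => pvH fl di (i, p) y)).sum := by
  symm
  unfold pvFlat
  rw [List.filter_flatMap, List.map_flatMap, List.flatMap_def, List.sum_flatten, List.map_map]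
  apply congrArg List.sum
  apply List.map_congr_left
  intro qM _
  simp only [Function.comp_def, List.filter_map, List.map_map, pvH, pvF, pvD]

-- a bucket-by-bucket sum is a sum over the flattened pair list
theorem pv_step4 (s : List Int) (G : Int × Int → Int) :
    ((pvGrp s).items.map (fun pL => (pL.2.map (fun i => G (i, pL.1))).sum)).sum
    = ((pvFlat s).map G).sum := by
  symm
  unfold pvFlat
  rw [List.map_flatMap, List.flatMap_def, List.sum_flatten, List.map_map]
  apply congrArg List.sum
  apply List.map_congr_left
  intro pL _
  simp only [Function.comp_def, List.map_map]

-- B's value in normal form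
theorem pv_B_eq (s : List Int) (cl fl di : List (List Int)) :
    calcular_custo_total_alt s cl fl di = ((pvFlat s).map (pvCL cl)).sum + pvSum fl di (pvFlat s) := by
  unfold calcular_custo_total_alt
  dsimp only
  rw [PySem.List.foldl_ite_eq_foldl_filter
        (p := fun ip : Int × Int => ip.2 ≠ -1)
        (f := fun (d : PySem.Dict Int (List Int)) (ip : Int × Int) =>
          d.modify ip.2 [] (fun L => L ++ [ip.1]))]
  have hg : ((PySem.List.enumerate s).filter
        (fun ip => decide (ip.2 ≠ -1))).foldl
        (fun d ip => d.modify ip.2 [] (fun L => L ++ [ip.1])) PySem.Dict.empty = pvGrp s := rfl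
  rw [hg]
  have hlin : ((pvGrp s).items.flatMap (fun pL => pL.2.map (fun i =>
        PySem.List.pyGetD (PySem.List.pyGetD cl i []) pL.1 0))).sum
      = ((pvFlat s).map (pvCL cl)).sum := by
    apply congrArg List.sum
    unfold pvFlat
    rw [List.map_flatMap]
    apply congrArg (fun f => List.flatMap f (pvGrp s).items) ?_
    funext pL
    rw [List.map_map]
    rfl
  have hin : ∀ (t : Int), ∀ pL ∈ (pvGrp s).items,
      ((pvGrp s).items.foldl (fun t qM =>
        if ((pL.2.flatMap (fun i => (qM.2.filter (fun k => decide (i < k))).map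
              (fun k => PySem.List.pyGetD (PySem.List.pyGetD fl i []) k 0))).sum) ≠ 0 then
          t + ((pL.2.flatMap (fun i => (qM.2.filter (fun k => decide (i < k))).map
              (fun k => PySem.List.pyGetD (PySem.List.pyGetD fl i []) k 0))).sum) *
            PySem.List.pyGetD (PySem.List.pyGetD di pL.1 []) qM.1 0
        else t) t)
      = t + ((pvGrp s).items.map (fun qM =>
          ((pL.2.flatMap (fun i => (qM.2.filter (fun k => decide (i < k))).map
              (fun k => pvF fl i k))).sum) * pvD di pL.1 qM.1)).sum := by
    intro t pL _
    rw [PySem.List.foldl_congr_mem _ _ (fun t qM =>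
        t + ((pL.2.flatMap (fun i => (qM.2.filter (fun k => decide (i < k))).map
            (fun k => pvF fl i k))).sum) * pvD di pL.1 qM.1) _ ?_,
      PySem.List.foldl_add]
    intro acc qM _
    by_cases hs : ((pL.2.flatMap (fun i => (qM.2.filter (fun k => decide (i < k))).map
        (fun k => PySem.List.pyGetD (PySem.List.pyGetD fl i []) k 0))).sum) ≠ 0
    · rw [if_pos hs]; rfl
    · rw [if_neg hs]
      have h0 : ((pL.2.flatMap (fun i => (qM.2.filter (fun k => decide (i < k))).map
          (fun k => pvF fl i k))).sum) = 0 := not_not.mp hs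
      show acc = acc + ((pL.2.flatMap (fun i => (qM.2.filter (fun k => decide (i < k))).map
          (fun k => pvF fl i k))).sum) * pvD di pL.1 qM.1
      rw [h0, zero_mul, add_zero]
  rw [PySem.List.foldl_congr_mem _ _ _ _ hin, PySem.List.foldl_add, hlin]
  congr 1
  calc ((pvGrp s).items.map (fun pL => ((pvGrp s).items.map (fun qM =>
          ((pL.2.flatMap (fun i => (qM.2.filter (fun k => decide (i < k))).map
              (fun k => pvF fl i k))).sum) * pvD di pL.1 qM.1)).sum)).sum
      = ((pvGrp s).items.map (fun pL => (pL.2.map (fun i =>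
          ((pvGrp s).items.map (fun qM => ((qM.2.filter (fun k => decide (i < k))).map
            (fun k => pvF fl i k * pvD di pL.1 qM.1)).sum)).sum)).sum)).sum := by
        apply congrArg List.sum
        apply List.map_congr_left
        intro pL _
        rw [show ((pvGrp s).items.map (fun qM =>
            ((pL.2.flatMap (fun i => (qM.2.filter (fun k => decide (i < k))).map
                (fun k => pvF fl i k))).sum) * pvD di pL.1 qM.1))
          = ((pvGrp s).items.map (fun qM => (pL.2.map (fun i =>
              ((qM.2.filter (fun k => decide (i < k))).map
                (fun k => pvF fl i k * pvD di pL.1 qM.1)).sum)).sum)) from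
          List.map_congr_left (fun qM _ => pv_step1 fl di pL qM)]
        exact pv_sum_swap (pvGrp s).items pL.2 (fun qM i =>
          ((qM.2.filter (fun k => decide (i < k))).map
            (fun k => pvF fl i k * pvD di pL.1 qM.1)).sum)
    _ = ((pvGrp s).items.map (fun pL => (pL.2.map (fun i =>
          (((pvFlat s).filter (fun y => decide (i < y.1))).map
            (fun y => pvH fl di (i, pL.1) y)).sum)).sum)).sum := by
        apply congrArg List.sum
        apply List.map_congr_left
        intro pL _
        apply congrArg List.sum
        apply List.map_congr_left
        intro i _
        exact pv_step3 s fl di i pL.1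
    _ = pvSum fl di (pvFlat s) := by
        exact pv_step4 s (fun x => (((pvFlat s).filter (fun y => decide (x.1 < y.1))).map
          (fun y => pvH fl di x y)).sum)

-- ===== VERDICT (by name: the statement is the Claim_ definition above) =====
theorem calcular_custo_total_spec : Claim_equal_calcular_custo_total := by
  intro s cl fl di _ _
  unfold Spec_calcular_custo_total
  rw [pv_A_eq, pv_B_eq, ((pv_flat_perm s).map (pvCL cl)).sum_eq, pv_sum_perm fl di (pv_flat_perm s)]
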